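-- pv_equiv track=rewrite | github.com/alexandraback/datacollection | solutions_5751500831719424_1/Python/zerodot/C.py | solve
-- ===== SOURCE A (Python) =====
-- def firsts(li):
--     return [e[0] for e in li]
--
-- def seconds(li):
--     return [e[1] for e in li]
--
-- def rezipper(li):
--     r=len(li[0])
--     return [[e[i] for e in li] for i in range(r)]
--
-- def dists(li):
--     return min([sum([abs(e-i) for e in li]) for i in li])
--
-- def counts(li):
--     ans=[(li[0],1)]
--     for i in range(1,len(li)):
--         if li[i]==li[i-1]:
--             ans=ans[:-1]+[(ans[-1][0],ans[-1][1]+1)]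
--         else:
--             ans=ans+[(li[i],1)]
--     return ans
--
-- def solve(strings):
--     comps=[counts(e) for e in strings]
--     fs=[firsts(e) for e in comps]
--     f=fs[0]
--     for e in fs:
--         if e!=f: return "Fegla Won"
--     else:
--         # "Omar Won"
--         fs=rezipper([seconds(e) for e in comps])
--         return str(sum([dists(e) for e in fs]))
-- ===== SOURCE B (Python) =====
-- def rle(s):
--     r = []
--     for c in s:
--         if r and r[-1][0] == c:
--             r[-1] = (r[-1][0], r[-1][1] + 1)
--         else:
--             r.append((c, 1))
--     return r
--
-- def solve(strings):
--     runs = [rle(s) for s in strings]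
--     key = [c for c, _ in runs[0]]
--     for r in runs:
--         if [c for c, _ in r] != key:
--             return "Fegla Won"
--     total = 0
--     for i in range(len(key)):
--         col = sorted(r[i][1] for r in runs)
--         m = col[len(col) // 2]
--         total += sum(abs(x - m) for x in col)
--     return str(total)
-- ===== Notes on version B (the rewrite author's own statement) =====
-- stated objective: faster
-- what changed: Run-length encoding is built in one pass with in-place last-run update instead of index-based list slicing/rebuilding, and the minimal sum of absolute deviations per run column is computed from the sorted column's median instead of trying every candidate in a quadratic scan.
import Mathlib
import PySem

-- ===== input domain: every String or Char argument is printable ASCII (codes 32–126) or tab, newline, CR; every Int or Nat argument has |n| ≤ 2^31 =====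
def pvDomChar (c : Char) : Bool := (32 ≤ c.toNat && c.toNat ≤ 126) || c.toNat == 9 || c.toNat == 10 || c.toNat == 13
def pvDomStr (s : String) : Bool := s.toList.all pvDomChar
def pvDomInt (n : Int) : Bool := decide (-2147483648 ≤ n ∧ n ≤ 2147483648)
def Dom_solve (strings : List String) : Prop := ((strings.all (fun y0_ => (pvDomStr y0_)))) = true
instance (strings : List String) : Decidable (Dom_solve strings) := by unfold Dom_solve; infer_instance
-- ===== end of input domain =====

-- B replaces A's slicing-based RLE rebuild and A's per-column scan over every candidate
-- by a one-pass RLE and the sorted column's median (a timing run measures the speed claim).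

-- ===== PORT A =====
def firstsA (li : List (Char × Int)) : List Char := li.map (fun e => e.1)

def secondsA (li : List (Char × Int)) : List Int := li.map (fun e => e.2)

-- rezipper: r = len(li[0]) (li[0] raises on empty li — excluded by Pre_); e[i] is exact
-- since under Pre_ every row has length r; range(r) over the Nat r = List.range r.
def rezipperA (li : List (List Int)) : List (List Int) :=
  let r := (li.headD []).length
  (List.range r).map (fun i => li.map (fun e => e.getD i 0))

-- dists: min([...]) raises on empty li — excluded by Pre_; .getD 0 is the unreached default.
def distsA (li : List Int) : Int :=
  (PySem.List.min? (li.map (fun i => (li.map (fun e => |e - i|)).sum)) (fun x => x)).getD 0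

-- counts: li[0] raises on empty li — excluded by Pre_ (the [] branch is unreached there).
def countsA (li : List Char) : List (Char × Int) :=
  match li with
  | [] => []
  | c0 :: _ =>
    (PySem.List.pyRange 1 (li.length : Int) 1).foldl
      (fun ans i =>
        if PySem.List.pyGetD li i ' ' = PySem.List.pyGetD li (i - 1) ' ' then
          ans.dropLast ++ [((PySem.List.pyGetD ans (-1) (' ', 0)).1,
                            (PySem.List.pyGetD ans (-1) (' ', 0)).2 + 1)]
        else
          ans ++ [(PySem.List.pyGetD li i ' ', 1)])
      [(c0, 1)]

def solve (strings : List String) : String :=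
  let comps := strings.map (fun e => countsA e.toList)
  let fs := comps.map (fun e => firstsA e)
  let f := fs.headD []   -- fs[0]; raises on an empty strings list — excluded by Pre_
  if fs.any (fun e => e != f) then "Fegla Won"
  else
    let fs2 := rezipperA (comps.map (fun e => secondsA e))
    PySem.Int.toStr ((fs2.map (fun e => distsA e)).sum)

-- ===== PORT B =====
def rleB (s : List Char) : List (Char × Int) :=
  s.foldl
    (fun r c =>
      match r.getLast? with
      | some last => if last.1 = c then r.dropLast ++ [(last.1, last.2 + 1)] else r ++ [(c, 1)]
      | none => [(c, 1)])
    []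

def medSum (col : List Int) : Int :=
  let m := col.getD (col.length / 2) 0   -- col[len(col)//2]; col nonempty under Pre_
  (col.map (fun x => |x - m|)).sum

def solve_alt (strings : List String) : String :=
  let runs := strings.map (fun s => rleB s.toList)
  let key := (runs.headD []).map (fun e => e.1)   -- runs[0]; raises on an empty strings list — excluded by Pre_
  if runs.any (fun r => r.map (fun e => e.1) != key) then "Fegla Won"
  else
    let total := (List.range key.length).foldl
      (fun acc i =>
        let col := PySem.List.sorted (runs.map (fun r => (r.getD i (' ', 0)).2)) (fun x => x) false
        acc + medSum col)
      0
    PySem.Int.toStr total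

-- ===== PRECONDITION & SPEC =====
-- Pre_ excludes exactly the inputs on which A raises IndexError:
-- an empty list of strings (fs[0]) and any empty string in it (counts(li) reads li[0]).
def Pre_solve (strings : List String) : Prop :=
  strings ≠ [] ∧ ∀ s ∈ strings, s ≠ ""
instance (strings : List String) : Decidable (Pre_solve strings) := by unfold Pre_solve; infer_instance

def pvWitness_solve : List String := ["aab", "ab"]

def Spec_solve (strings : List String) (out : String) : Prop := out = solve_alt strings
instance (strings : List String) (out : String) : Decidable (Spec_solve strings out) := by unfold Spec_solve; infer_instance

-- ===== CLAIM (what is proved, stated in full; the proofs are below) =====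
def Claim_equal_solve : Prop := ∀ (strings : List String), Dom_solve strings → Pre_solve strings → Spec_solve strings (solve strings)

-- ===== LEMMAS AND PROOFS =====

-- ---- sum of absolute deviations and the median inequality ----
def sAbs (l : List Int) (m : Int) : Int := (l.map (fun x => |x - m|)).sum

theorem sAbs_decomp (a z x : Int) (mid : List Int) :
    sAbs (a :: (mid ++ [z])) x = |a - x| + sAbs mid x + |z - x| := by
  simp [sAbs]; ring

theorem pair_ge (a z i : Int) : z - a ≤ |a - i| + |z - i| := by
  have h1 : i - a ≤ |a - i| := by rw [abs_sub_comm]; exact le_abs_self _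
  have h2 : z - i ≤ |z - i| := le_abs_self _
  linarith

-- the (upper) median of a sorted list minimises the sum of absolute deviations
theorem medMin : ∀ (n : Nat) (l : List Int), l.length = n → l.Pairwise (· ≤ ·) →
    ∀ i, sAbs l (l.getD (l.length / 2) 0) ≤ sAbs l i := by
  intro n
  induction n using Nat.strong_induction_on with
  | _ n ih =>
    intro l hlen hsort i
    match l with
    | [] => simp [sAbs]
    | [a] => simp [sAbs]
    | a :: b :: t =>
      obtain ⟨mid, z, hmz⟩ : ∃ mid z, b :: t = mid ++ [z] := by
        rcases (b :: t).eq_nil_or_concat with h | ⟨L, c, h⟩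
        · simp at h
        · exact ⟨L, c, by simpa [List.concat_eq_append] using h⟩
      rw [hmz] at hsort hlen ⊢
      rw [List.pairwise_cons] at hsort
      obtain ⟨ha, htail⟩ := hsort
      rw [List.pairwise_append] at htail
      obtain ⟨hmid, -, hz⟩ := htail
      have hz' : ∀ x ∈ mid, x ≤ z := fun x hx => hz x hx z (by simp)
      rcases mid with _ | ⟨m0, mid'⟩
      · -- l = [a, z]
        have haz : a ≤ z := ha z (by simp)
        simp only [List.nil_append]
        have : ((a :: [z]).getD ((a :: [z]).length / 2) 0) = z := by simp
        rw [this]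
        simp [sAbs]
        have := pair_ge a z i
        have hza : |a - z| = z - a := by rw [abs_sub_comm]; exact abs_of_nonneg (by linarith)
        have hzn : |z - i| ≥ 0 := abs_nonneg _
        linarith
      · set mid := m0 :: mid' with hmiddef
        have hmlen : 1 ≤ mid.length := by simp [hmiddef]
        have hidx : (a :: (mid ++ [z])).length / 2 = mid.length / 2 + 1 := by
          simp only [List.length_cons, List.length_append, List.length_nil]
          omega
        have hgetD : (a :: (mid ++ [z])).getD ((a :: (mid ++ [z])).length / 2) 0
            = mid.getD (mid.length / 2) 0 := by
          rw [hidx, List.getD_cons_succ]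
          have : mid.length / 2 < mid.length := by omega
          rw [List.getD_append _ _ _ _ this]
        set M := mid.getD (mid.length / 2) 0 with hMdef
        have hMmem : M ∈ mid := by
          have hlt : mid.length / 2 < mid.length := by omega
          rw [hMdef, List.getD_eq_getElem _ _ hlt]
          exact List.getElem_mem _
        have haM : a ≤ M := ha M (by simp [hMmem])
        have hMz : M ≤ z := hz' M hMmem
        have hIH := ih mid.length (by omega) mid rfl hmid
        have hIHi : sAbs mid (mid.getD (mid.length / 2) 0) ≤ sAbs mid i := hIH i
        rw [hgetD]
        rw [sAbs_decomp, sAbs_decomp]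
        have h1 : |a - M| = M - a := by rw [abs_sub_comm]; exact abs_of_nonneg (by linarith)
        have h2 : |z - M| = z - M := abs_of_nonneg (by linarith)
        have h3 := pair_ge a z i
        linarith

theorem sAbs_perm {l l' : List Int} (h : l.Perm l') (x : Int) : sAbs l x = sAbs l' x :=
  List.Perm.sum_eq (h.map _)

-- A's candidate scan equals B's median formula on a nonempty column
theorem distsA_eq_medSum (li : List Int) (h : li ≠ []) :
    distsA li = medSum (PySem.List.sorted li (fun x => x) false) := by
  set col := PySem.List.sorted li (fun x => x) false with hcol
  have hperm : col.Perm li := PySem.List.sorted_perm li _ _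
  have hpw : col.Pairwise (· ≤ ·) := by
    have := PySem.List.sorted_pairwise li (fun x => x)
    simpa using this
  have hlen : col.length = li.length := hperm.length_eq
  have hlpos : 0 < li.length := List.length_pos_iff.mpr h
  set M := col.getD (col.length / 2) 0 with hM
  have hMcol : M ∈ col := by
    have hlt : col.length / 2 < col.length := by omega
    rw [hM, List.getD_eq_getElem _ _ hlt]
    exact List.getElem_mem _
  have hMli : M ∈ li := hperm.mem_iff.mp hMcol
  have hmed : medSum col = sAbs col M := rfl
  cases hmin : PySem.List.min? (li.map (fun i => (li.map (fun e => |e - i|)).sum)) (fun x => x) with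
  | none =>
    exfalso
    have := (PySem.List.min?_eq_none_iff
      (xs := li.map (fun i => (li.map (fun e => |e - i|)).sum)) (key := fun x => x)).mp hmin
    simp [List.map_eq_nil_iff] at this
    exact h this
  | some v =>
    have hvmem := PySem.List.min?_mem hmin
    obtain ⟨i0, hi0, hv⟩ := List.mem_map.mp hvmem
    have hmins := PySem.List.min?_isMin hmin
    have hvleM : v ≤ sAbs li M := by
      have : (li.map (fun e => |e - M|)).sum ∈ li.map (fun i => (li.map (fun e => |e - i|)).sum) :=
        List.mem_map_of_mem hMli
      simpa [sAbs] using hmins _ this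
    have hMlev : sAbs li M ≤ v := by
      have h1 : sAbs col M ≤ sAbs col i0 := by
        have := medMin col.length col rfl hpw i0
        rw [← hM] at this; exact this
      rw [sAbs_perm hperm, sAbs_perm hperm] at h1
      have : sAbs li i0 = v := by rw [← hv]; rfl
      omega
    have : v = sAbs li M := le_antisymm hvleM hMlev
    rw [distsA, hmin, hmed, sAbs_perm hperm]
    simp [this]

-- ---- both RLE loops compute the same encoding ----
def rleGo : Char → Int → List Char → List (Char × Int)
  | c, k, [] => [(c, k)]
  | c, k, d :: rest => if c = d then rleGo c (k + 1) rest else (c, k) :: rleGo d 1 rest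

def gA2 (ans : List (Char × Int)) (prev cur : Char) : List (Char × Int) :=
  if cur = prev then
    ans.dropLast ++ [((PySem.List.pyGetD ans (-1) (' ', 0)).1,
                      (PySem.List.pyGetD ans (-1) (' ', 0)).2 + 1)]
  else ans ++ [(cur, 1)]

-- an index fold over adjacent positions is a fold over adjacent pairs
theorem foldIdxPairs {β : Type} (g : β → Char → Char → β) :
    ∀ (l : List Char) (a : β),
    (List.range (l.length - 1)).foldl (fun ans j => g ans (l.getD j ' ') (l.getD (j + 1) ' ')) a
    = (l.zip l.tail).foldl (fun ans p => g ans p.1 p.2) a := by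
  intro l
  induction l with
  | nil => intro a; simp
  | cons x xs ih =>
    intro a
    cases xs with
    | nil => simp
    | cons y rest =>
      have hlen : (x :: y :: rest).length - 1 = rest.length + 1 := by simp
      rw [hlen, List.range_succ_eq_map, List.foldl_cons, List.foldl_map]
      have h0 : (x :: y :: rest).getD 0 ' ' = x := rfl
      have h1 : (x :: y :: rest).getD (0 + 1) ' ' = y := rfl
      rw [h0, h1]
      have hbody : (List.range rest.length).foldl
            (fun (ans : β) (j : Nat) =>
              g ans ((x :: y :: rest).getD (j.succ) ' ') ((x :: y :: rest).getD (j.succ + 1) ' '))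
            (g a x y)
          = (List.range ((y :: rest).length - 1)).foldl
            (fun ans j => g ans ((y :: rest).getD j ' ') ((y :: rest).getD (j + 1) ' ')) (g a x y) := by
        have : (y :: rest).length - 1 = rest.length := by simp
        rw [this]
        rfl
      rw [hbody, ih]
      rfl

theorem zipGoA : ∀ (l : List Char) (c : Char) (acc : List (Char × Int)) (k : Int),
    ((c :: l).zip l).foldl (fun ans p => gA2 ans p.1 p.2) (acc ++ [(c, k)])
    = acc ++ rleGo c k l := by
  intro l
  induction l with
  | nil => intro c acc k; simp [rleGo]
  | cons d rest ih =>
    intro c acc k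
    have hzip : ((c :: d :: rest).zip (d :: rest)) = (c, d) :: ((d :: rest).zip rest) := rfl
    rw [hzip, List.foldl_cons]
    by_cases h : c = d
    · subst h
      have hg : gA2 (acc ++ [(c, k)]) c c = acc ++ [(c, k + 1)] := by
        simp [gA2, PySem.List.pyGetD_neg_one_append_singleton]
      rw [hg, ih]
      simp [rleGo]
    · have hg : gA2 (acc ++ [(c, k)]) c d = (acc ++ [(c, k)]) ++ [(d, 1)] := by
        simp [gA2, Ne.symm h]
      rw [hg, ih]
      simp [rleGo, h]

theorem rleB_go : ∀ (l : List Char) (acc : List (Char × Int)) (c : Char) (k : Int),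
    l.foldl
      (fun r ch =>
        match r.getLast? with
        | some last => if last.1 = ch then r.dropLast ++ [(last.1, last.2 + 1)] else r ++ [(ch, 1)]
        | none => [(ch, 1)])
      (acc ++ [(c, k)])
    = acc ++ rleGo c k l := by
  intro l
  induction l with
  | nil => intro acc c k; simp [rleGo]
  | cons d rest ih =>
    intro acc c k
    rw [List.foldl_cons]
    have hlast : (acc ++ [(c, k)]).getLast? = some (c, k) := by simp
    by_cases h : c = d
    · subst h
      have hstep : (match (acc ++ [(c, k)]).getLast? with
          | some last => if last.1 = c then (acc ++ [(c, k)]).dropLast ++ [(last.1, last.2 + 1)]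
                         else (acc ++ [(c, k)]) ++ [(c, 1)]
          | none => [(c, 1)]) = acc ++ [(c, k + 1)] := by
        rw [hlast]; simp
      rw [hstep, ih]
      simp [rleGo]
    · have hstep : (match (acc ++ [(c, k)]).getLast? with
          | some last => if last.1 = d then (acc ++ [(c, k)]).dropLast ++ [(last.1, last.2 + 1)]
                         else (acc ++ [(c, k)]) ++ [(d, 1)]
          | none => [(d, 1)]) = (acc ++ [(c, k)]) ++ [(d, 1)] := by
        rw [hlast]; simp [h]
      rw [hstep, ih (acc ++ [(c, k)]) d 1]
      simp [rleGo, h]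

theorem counts_eq_rle : ∀ (l : List Char), countsA l = rleB l := by
  intro l
  cases l with
  | nil => rfl
  | cons c rest =>
    have hB : rleB (c :: rest) = rleGo c 1 rest := by
      rw [rleB, List.foldl_cons]
      have : (match ([] : List (Char × Int)).getLast? with
        | some last => if last.1 = c then ([] : List (Char × Int)).dropLast ++ [(last.1, last.2 + 1)] else [] ++ [(c, 1)]
        | none => [(c, 1)]) = [(c, 1)] := rfl
      rw [this]
      have := rleB_go rest [] c 1
      simpa using this
    have hA : countsA (c :: rest) = rleGo c 1 rest := by
      rw [countsA]
      rw [PySem.List.pyRange_one]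
      have hlen : (((c :: rest).length : Int) - 1).toNat = rest.length := by simp
      rw [hlen, List.foldl_map]
      have hbody : (fun (ans : List (Char × Int)) (k : Nat) =>
          (fun ans (i : Int) =>
            if PySem.List.pyGetD (c :: rest) i ' ' = PySem.List.pyGetD (c :: rest) (i - 1) ' ' then
              ans.dropLast ++ [((PySem.List.pyGetD ans (-1) (' ', 0)).1,
                                (PySem.List.pyGetD ans (-1) (' ', 0)).2 + 1)]
            else
              ans ++ [(PySem.List.pyGetD (c :: rest) i ' ', 1)]) ans ((1 : Int) + (k : Int)))
          = fun ans j => gA2 ans ((c :: rest).getD j ' ') ((c :: rest).getD (j + 1) ' ') := by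
        funext ans j
        have hc1 : (1 : Int) + (j : Int) = ((j + 1 : Nat) : Int) := by push_cast; ring
        simp only [hc1]
        rw [show ((j + 1 : Nat) : Int) - 1 = ((j : Nat) : Int) by push_cast; ring]
        rw [PySem.List.pyGetD_natCast, PySem.List.pyGetD_natCast]
        rfl
      rw [hbody]
      have := foldIdxPairs gA2 (c :: rest) [(c, 1)]
      simp only [List.length_cons, Nat.add_sub_cancel] at this
      rw [this]
      have htail : (c :: rest).tail = rest := rfl
      rw [htail]
      have := zipGoA rest c [] 1
      simpa using this
    rw [hA, hB]

-- ---- assembly ----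
theorem solve_eq (strings : List String) (hne : strings ≠ []) :
    solve strings = solve_alt strings := by
  obtain ⟨s0, ss, rfl⟩ : ∃ s0 ss, strings = s0 :: ss := by
    cases strings with
    | nil => exact absurd rfl hne
    | cons a b => exact ⟨a, b, rfl⟩
  simp only [solve, solve_alt]
  have hmap : (s0 :: ss).map (fun e => countsA e.toList) = (s0 :: ss).map (fun s => rleB s.toList) := by
    simp [counts_eq_rle]
  rw [hmap]
  set runs := (s0 :: ss).map (fun s => rleB s.toList) with hruns
  have hrunsne : runs = rleB s0.toList :: ss.map (fun s => rleB s.toList) := by simp [hruns]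
  have hhead : (runs.map (fun e => firstsA e)).headD [] = (runs.headD []).map (fun e => e.1) := by
    rw [hrunsne]; rfl
  have hcond : (runs.map (fun e => firstsA e)).any (fun e => e != (runs.map (fun e => firstsA e)).headD [])
      = runs.any (fun r => r.map (fun e => e.1) != (runs.headD []).map (fun e => e.1)) := by
    rw [hhead, List.any_map]
    rfl
  rw [hcond]
  by_cases hc : runs.any (fun r => r.map (fun e => e.1) != (runs.headD []).map (fun e => e.1)) = true
  · rw [if_pos hc, if_pos hc]
  · rw [if_neg hc, if_neg hc]
    congr 1
    set key := (runs.headD []).map (fun e => e.1) with hkey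
    have hall : ∀ r ∈ runs, r.map (fun e => e.1) = key := by
      intro r hr
      have hcf : runs.any (fun r => r.map (fun e => e.1) != key) = false :=
        Bool.eq_false_iff.mpr hc
      have := (List.any_eq_false).mp hcf r hr
      simpa using this
    have hlenr : ∀ r ∈ runs, r.length = key.length := by
      intro r hr
      have := congrArg List.length (hall r hr)
      simpa using this
    have hhead0 : runs.headD [] = rleB s0.toList := by rw [hrunsne]; rfl
    have hrlen : ((runs.map (fun e => secondsA e)).headD []).length = key.length := by
      rw [hrunsne, hkey, hhead0]
      simp [secondsA]
    rw [rezipperA]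
    simp only [hrlen]
    rw [List.map_map, PySem.List.foldl_add]
    simp only [zero_add]
    congr 1
    apply List.map_congr_left
    intro i hi
    have hilt : i < key.length := List.mem_range.mp hi
    have hcols : (runs.map (fun e => secondsA e)).map (fun e => e.getD i 0)
        = runs.map (fun r => (r.getD i (' ', 0)).2) := by
      rw [List.map_map]
      apply List.map_congr_left
      intro r hr
      have hlt : i < r.length := by rw [hlenr r hr]; exact hilt
      simp only [Function.comp, secondsA]
      rw [List.getD_eq_getElem _ _ (by simpa using hlt), List.getD_eq_getElem _ _ hlt]
      simp
    have hcolne : runs.map (fun r => (r.getD i (' ', 0)).2) ≠ [] := by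
      rw [hrunsne]; simp
    simp only [Function.comp]
    rw [hcols, distsA_eq_medSum _ hcolne]

-- ===== VERDICT (by name: the statement is the Claim_ definition above) =====
theorem solve_spec : Claim_equal_solve := by
  intro strings _ hpre
  unfold Spec_solve
  exact solve_eq strings hpre.1
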